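-- pv_equiv track=rewrite | github.com/GuangjiHuang/shell_script | arithmetic-generator/generator.py | concealAnswer
-- ===== SOURCE A (Python) =====
-- BLUE = "\033[0;45m"
--
-- NOCOLOR = "\033[0m"
--
-- def concealAnswer(content, is_use_color=True):
--     conceal_content = ""
--     flag = False
--     for i in range(len(content)):
--         ch = content[i]
--         if ch == "=":
--             flag = True
--             conceal_content += ch
--         else:
--             if flag and ch.isdigit():
--                 conceal_content += " "
--                 # cancle the flag
--                 if i+1<len(content) and not content[i+1].isdigit():
--                     flag = False
--             else:
--                 conceal_content += ch
--     # change the content to add the color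
--     if not is_use_color:
--         return conceal_content
--     return showColor(conceal_content)
--
-- def showColor(conceal_content, color=BLUE):
--     new_conceal_content = ""
--     c_len = len(conceal_content)
--     k = 0
--     while k < c_len:
--         ch = conceal_content[k]
--         if ch == "(":
--             # not the digit
--             while not conceal_content[k].isdigit():
--                 new_conceal_content += conceal_content[k]
--                 k += 1
--             # inside the digit
--             number_id = ""
--             while conceal_content[k].isdigit():
--                 number_id += conceal_content[k]
--                 k += 1
--             if int(number_id) % 10 < 2:
--                 new_conceal_content += color + number_id + NOCOLOR
--             else:
--                 new_conceal_content += number_id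
--             #while conceal_content[k] != ")":
--             #    if conceal_content[k].isdigit() and not conceal_content[k-1].isdigit():
--             #        new_conceal_content += color
--             #        new_conceal_content += conceal_content[k]
--             #    elif conceal_content[k].isdigit() and not conceal_content[k+1].isdigit():
--             #        new_conceal_content += conceal_content[k]
--             #        new_conceal_content += NOCOLOR
--             #    else:
--             #        new_conceal_content += conceal_content[k]
--             #    k += 1
--         else:
--             new_conceal_content += ch
--             k += 1
--     return new_conceal_content
-- ===== SOURCE B (Python) =====
-- BLUE = "\033[0;45m"
--
-- NOCOLOR = "\033[0m"
--
-- def concealAnswer(content, is_use_color=True):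
--     conceal_content = _conceal(content)
--     if not is_use_color:
--         return conceal_content
--     return showColor(conceal_content)
--
-- def _split_first_digit_run(seg):
--     # seg -> (prefix before first digit, first maximal digit run, remainder)
--     i = 0
--     while i < len(seg) and not seg[i].isdigit():
--         i += 1
--     j = i
--     while j < len(seg) and seg[j].isdigit():
--         j += 1
--     return seg[:i], seg[i:j], seg[j:]
--
-- def _conceal(s):
--     # jump to the first '=', blank the first digit run after it, recurse on the rest
--     head, sep, tail = s.partition("=")
--     if not sep:
--         return s
--     pre, run, rest = _split_first_digit_run(tail)
--     return head + "=" + pre + " " * len(run) + _conceal(rest)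
--
-- def showColor(conceal_content, color=BLUE):
--     # jump to the first '(', colorize the first digit run after it when its value
--     # ends in 0 or 1, recurse on the rest
--     head, sep, tail = conceal_content.partition("(")
--     if not sep:
--         return conceal_content
--     pre, run, rest = _split_first_digit_run(tail)
--     colored = run
--     if run and int(run) % 10 < 2:
--         colored = color + run + NOCOLOR
--     return head + "(" + pre + colored + showColor(rest)
-- ===== Notes on version B (the rewrite author's own statement) =====
-- stated objective: simpler
-- what changed: Both passes are rewritten from character-by-character state machines into segment recursion: the concealment pass partitions at each '=' and blanks the first maximal digit run of the following segment by slicing, and showColor likewise partitions at each '(' and colorizes the sliced-out first digit run; this also replaces A's per-character string accumulation (each '+=' recopies the accumulator) by one concatenation of a few slices per segment.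
import Mathlib
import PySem

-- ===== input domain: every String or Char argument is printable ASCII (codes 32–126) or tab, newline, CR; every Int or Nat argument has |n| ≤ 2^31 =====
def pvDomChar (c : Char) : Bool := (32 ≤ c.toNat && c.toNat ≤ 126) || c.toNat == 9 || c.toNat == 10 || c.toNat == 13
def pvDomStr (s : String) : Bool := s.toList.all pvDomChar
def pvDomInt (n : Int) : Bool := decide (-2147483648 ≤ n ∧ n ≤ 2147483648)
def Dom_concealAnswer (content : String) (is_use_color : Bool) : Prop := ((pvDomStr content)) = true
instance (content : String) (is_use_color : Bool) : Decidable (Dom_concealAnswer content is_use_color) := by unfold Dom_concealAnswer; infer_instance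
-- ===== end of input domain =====

-- B replaces both character-by-character state machines by segment recursion: it partitions at
-- each '='/'(' and handles the first digit run of each segment by slicing (objective: simpler).

-- ===== PORT A =====
def pvBLUE : List Char := ['\x1b', '[', '0', ';', '4', '5', 'm']    -- "\033[0;45m"
def pvNOCOLOR : List Char := ['\x1b', '[', '0', 'm']                -- "\033[0m"

-- A's 'while not conceal_content[k].isdigit(): … k += 1' as (consumed prefix, remainder)
def pvSkipNonDigit : List Char → List Char × List Char
  | [] => ([], [])
  | c :: t =>
    if PySem.Chars.isdigit c then ([], c :: t)
    else
      let p := pvSkipNonDigit t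
      (c :: p.1, p.2)

-- A's 'while conceal_content[k].isdigit(): … k += 1' as (digit run, remainder)
def pvTakeDigits : List Char → List Char × List Char
  | [] => ([], [])
  | c :: t =>
    if PySem.Chars.isdigit c then
      let p := pvTakeDigits t
      (c :: p.1, p.2)
    else ([], c :: t)

theorem pvSkipNonDigit_len (l : List Char) : (pvSkipNonDigit l).2.length ≤ l.length := by
  induction l with
  | nil => simp [pvSkipNonDigit]
  | cons c t ih =>
    simp only [pvSkipNonDigit]
    split
    · simp
    · simpa using Nat.le_succ_of_le ih

theorem pvTakeDigits_len (l : List Char) : (pvTakeDigits l).2.length ≤ l.length := by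
  induction l with
  | nil => simp [pvTakeDigits]
  | cons c t ih =>
    simp only [pvTakeDigits]
    split
    · simpa using Nat.le_succ_of_le ih
    · simp

theorem pvShowColor_dec (t : List Char) :
    (pvTakeDigits (pvSkipNonDigit ('(' :: t)).2).2.length < ('(' :: t).length := by
  have h1 : (pvSkipNonDigit ('(' :: t)).2 = (pvSkipNonDigit t).2 := by
    simp [pvSkipNonDigit, PySem.Chars.isdigit]
  calc (pvTakeDigits (pvSkipNonDigit ('(' :: t)).2).2.length
      ≤ (pvSkipNonDigit ('(' :: t)).2.length := pvTakeDigits_len _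
    _ = (pvSkipNonDigit t).2.length := by rw [h1]
    _ ≤ t.length := pvSkipNonDigit_len t
    _ < ('(' :: t).length := by simp

-- showColor of Source A.  Where the Python raises IndexError (a '(' whose digit hunt or digit run
-- runs off the end of the string) the two while-loop helpers stop at the end instead; those
-- inputs are excluded by Pre_concealAnswer.  int(number_id) is PySem.Int.ofChars?; its 'none'
-- branch is unreachable in Python (number_id is a nonempty digit run there) and is totalised
-- as the uncolored arm.
def pvShowColor : List Char → List Char
  | [] => []
  | c :: t =>
    if h : c = '(' then
      let s1 := pvSkipNonDigit (c :: t)     -- while not conceal_content[k].isdigit()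
      let s2 := pvTakeDigits s1.2           -- while conceal_content[k].isdigit()
      match PySem.Int.ofChars? s2.1 with    -- int(number_id)
      | none => s1.1 ++ s2.1 ++ pvShowColor s2.2
      | some nid =>
        if PySem.Int.mod nid 10 < 2 then
          s1.1 ++ pvBLUE ++ s2.1 ++ pvNOCOLOR ++ pvShowColor s2.2
        else
          s1.1 ++ s2.1 ++ pvShowColor s2.2
    else c :: pvShowColor t
termination_by l => l.length
decreasing_by
  all_goals first
  | (subst h; exact pvShowColor_dec t)
  | simp

-- the lookahead 'if i+1 < len(content) and not content[i+1].isdigit(): flag = False':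
-- the flag stays up only when there is no next character or it is a digit
def pvNextFlag : List Char → Bool
  | [] => true
  | c2 :: _ => PySem.Chars.isdigit c2

-- the character loop of concealAnswer, with its carried flag; the lookahead
-- content[i+1] is the head of the remainder
def pvConcealA : List Char → Bool → List Char
  | [], _ => []
  | c :: rest, flag =>
    if c = '=' then c :: pvConcealA rest true
    else if flag && PySem.Chars.isdigit c then
      ' ' :: pvConcealA rest (pvNextFlag rest)
    else c :: pvConcealA rest flag

def concealAnswer (content : String) (is_use_color : Bool) : String :=
  let conceal_content := pvConcealA content.toList false
  if is_use_color = false then String.ofList conceal_content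
  else String.ofList (pvShowColor conceal_content)

-- ===== PORT B =====
-- s.partition(sep) : none = sep absent, some (head, tail) = parts around the first sep
def pvPart (sep : Char) : List Char → Option (List Char × List Char)
  | [] => none
  | c :: t =>
    if c = sep then some ([], t)
    else
      match pvPart sep t with
      | none => none
      | some p => some (c :: p.1, p.2)

theorem pvPart_len (sep : Char) (l : List Char) (p : List Char × List Char)
    (h : pvPart sep l = some p) : p.2.length < l.length := by
  induction l generalizing p with
  | nil => simp [pvPart] at h
  | cons c t ih =>
    simp only [pvPart] at h
    split at h
    · cases h; simp
    · cases hp : pvPart sep t with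
      | none => rw [hp] at h; cases h
      | some q =>
        rw [hp] at h
        cases h
        exact Nat.lt_succ_of_lt (ih q hp)

-- _split_first_digit_run: the two index loops compute seg[:i] / seg[i:j] / seg[j:], i.e. the
-- maximal non-digit prefix, the following maximal digit run and the rest
def pvSplitRun (seg : List Char) : List Char × List Char × List Char :=
  let pre := seg.takeWhile (fun c => !PySem.Chars.isdigit c)
  let r := seg.dropWhile (fun c => !PySem.Chars.isdigit c)
  (pre, r.takeWhile PySem.Chars.isdigit, r.dropWhile PySem.Chars.isdigit)

theorem pvSplitRun_len (seg : List Char) : (pvSplitRun seg).2.2.length ≤ seg.length := by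
  calc (pvSplitRun seg).2.2.length
      ≤ (seg.dropWhile (fun c => !PySem.Chars.isdigit c)).length :=
        List.length_dropWhile_le _ _
    _ ≤ seg.length := List.length_dropWhile_le _ _

-- _conceal: jump to the first '=', blank the first digit run after it, recurse on the rest
def pvConcealB (s : List Char) : List Char :=
  match hp : pvPart '=' s with
  | none => s
  | some p =>
    let t := pvSplitRun p.2
    p.1 ++ '=' :: t.1 ++ List.replicate t.2.1.length ' ' ++ pvConcealB t.2.2
termination_by s.length
decreasing_by
  exact Nat.lt_of_le_of_lt (pvSplitRun_len p.2) (pvPart_len '=' s p hp)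

-- showColor of Source B: jump to the first '(', colorize the first digit run after it when its
-- value ends in 0 or 1, recurse on the rest.  'if run and int(run) % 10 < 2' is one match on
-- ofChars? run: none exactly when run is empty (a nonempty digit run always parses).
def pvShowColorB (s : List Char) : List Char :=
  match hp : pvPart '(' s with
  | none => s
  | some p =>
    let t := pvSplitRun p.2
    let colored :=
      match PySem.Int.ofChars? t.2.1 with
      | none => t.2.1
      | some nid =>
        if PySem.Int.mod nid 10 < 2 then pvBLUE ++ t.2.1 ++ pvNOCOLOR else t.2.1
    p.1 ++ '(' :: t.1 ++ colored ++ pvShowColorB t.2.2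
termination_by s.length
decreasing_by
  exact Nat.lt_of_le_of_lt (pvSplitRun_len p.2) (pvPart_len '(' s p hp)

def concealAnswer_alt (content : String) (is_use_color : Bool) : String :=
  let conceal_content := pvConcealB content.toList
  if is_use_color = false then String.ofList conceal_content
  else String.ofList (pvShowColorB conceal_content)

-- ===== PRECONDITION & SPEC =====
-- digit test at position k (out of range counts as not a digit)
def pvDigitAt (l : List Char) (k : Nat) : Bool := PySem.Chars.isdigit (l.getD k ' ')
-- the digit at position q is NOT blanked by the concealment pass: every '=' before q is
-- followed by a completed digit run before q (which resets the flag)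
def pvSurvives (l : List Char) (q : Nat) : Bool :=
  pvDigitAt l q &&
    (List.range q).all (fun i =>
      l.getD i ' ' != '=' ||
        (List.range q).any (fun p =>
          decide (i < p) && pvDigitAt l p && !pvDigitAt l (p + 1)))
-- Pre_ excludes exactly the inputs on which A raises IndexError in showColor: with color on,
-- some '(' in the concealed content is not followed by a digit run that ends before the end
-- of the string (the digit hunt or the digit-collecting loop runs off the end).
def Pre_concealAnswer (content : String) (is_use_color : Bool) : Prop :=
  is_use_color = true →
    ∀ k < content.toList.length, content.toList.getD k ' ' = '(' →
      ∃ p < content.toList.length - 1, k < p ∧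
        pvSurvives content.toList p = true ∧ pvSurvives content.toList (p + 1) = false
instance (content : String) (is_use_color : Bool) : Decidable (Pre_concealAnswer content is_use_color) := by
  unfold Pre_concealAnswer; infer_instance

def pvWitness_concealAnswer : String × Bool := ("(1+2=3)", true)

def Spec_concealAnswer (content : String) (is_use_color : Bool) (out : String) : Prop := out = concealAnswer_alt content is_use_color
instance (content : String) (is_use_color : Bool) (out : String) : Decidable (Spec_concealAnswer content is_use_color out) := by unfold Spec_concealAnswer; infer_instance

-- ===== CLAIM (what is proved, stated in full; the proofs are below) =====
def Claim_equal_concealAnswer : Prop := ∀ (content : String) (is_use_color : Bool), Dom_concealAnswer content is_use_color → Pre_concealAnswer content is_use_color → Spec_concealAnswer content is_use_color (concealAnswer content is_use_color)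

-- ===== LEMMAS AND PROOFS =====

theorem pvPart_none (sep : Char) (l : List Char) (h : pvPart sep l = none) :
    ∀ c ∈ l, c ≠ sep := by
  induction l with
  | nil => simp
  | cons c t ih =>
    simp only [pvPart] at h
    split at h
    · cases h
    · rename_i hc
      cases hp : pvPart sep t with
      | none =>
        intro x hx
        rcases List.mem_cons.1 hx with rfl | hx'
        · exact fun he => hc he
        · exact ih hp x hx'
      | some q => rw [hp] at h; cases h

theorem pvPart_some (sep : Char) (l : List Char) (p : List Char × List Char)
    (h : pvPart sep l = some p) : l = p.1 ++ sep :: p.2 ∧ ∀ c ∈ p.1, c ≠ sep := by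
  induction l generalizing p with
  | nil => simp [pvPart] at h
  | cons c t ih =>
    simp only [pvPart] at h
    split at h
    · rename_i hc
      cases h
      subst hc
      simp
    · rename_i hc
      cases hp : pvPart sep t with
      | none => rw [hp] at h; cases h
      | some q =>
        rw [hp] at h
        cases h
        obtain ⟨hq1, hq2⟩ := ih q hp
        constructor
        · simp [hq1]
        · intro x hx
          rcases List.mem_cons.1 hx with rfl | hx'
          · exact fun he => hc he
          · exact hq2 x hx'

-- the sliced triple equals A's two loop helpers chained
theorem pvSkipNonDigit_eq (l : List Char) :
    pvSkipNonDigit l = (l.takeWhile (fun c => !PySem.Chars.isdigit c),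
                        l.dropWhile (fun c => !PySem.Chars.isdigit c)) := by
  induction l with
  | nil => simp [pvSkipNonDigit]
  | cons c t ih =>
    by_cases hd : PySem.Chars.isdigit c = true
    · simp [pvSkipNonDigit, hd, List.takeWhile_cons, List.dropWhile_cons]
    · simp [pvSkipNonDigit, hd, List.takeWhile_cons, List.dropWhile_cons, ih]

theorem pvTakeDigits_eq (l : List Char) :
    pvTakeDigits l = (l.takeWhile PySem.Chars.isdigit, l.dropWhile PySem.Chars.isdigit) := by
  induction l with
  | nil => simp [pvTakeDigits]
  | cons c t ih =>
    by_cases hd : PySem.Chars.isdigit c = true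
    · simp [pvTakeDigits, hd, List.takeWhile_cons, List.dropWhile_cons, ih]
    · simp [pvTakeDigits, hd, List.takeWhile_cons, List.dropWhile_cons]

theorem pvSplitRun_eq (seg : List Char) :
    pvSplitRun seg = ((pvSkipNonDigit seg).1,
                      (pvTakeDigits (pvSkipNonDigit seg).2).1,
                      (pvTakeDigits (pvSkipNonDigit seg).2).2) := by
  simp [pvSplitRun, pvSkipNonDigit_eq, pvTakeDigits_eq]

-- with the flag down, characters before the first '=' are copied verbatim
theorem pvConcealA_copy (h m : List Char) (hne : ∀ c ∈ h, c ≠ '=') :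
    pvConcealA (h ++ m) false = h ++ pvConcealA m false := by
  induction h with
  | nil => rfl
  | cons c t ih =>
    have hc : c ≠ '=' := hne c (List.mem_cons_self ..)
    have hrest := ih (fun x hx => hne x (List.mem_cons_of_mem _ hx))
    simp [pvConcealA, hc, hrest]

theorem pvConcealB_nil : pvConcealB [] = [] := by
  unfold pvConcealB
  rfl

-- the main invariant: A's flag-machine equals B's segment blanking, for both flag values
theorem pvConceal_main : ∀ n : Nat, ∀ l : List Char, l.length ≤ n →
    pvConcealA l false = pvConcealB l ∧
    pvConcealA l true =
      (pvSkipNonDigit l).1 ++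
        List.replicate (pvTakeDigits (pvSkipNonDigit l).2).1.length ' ' ++
        pvConcealB (pvTakeDigits (pvSkipNonDigit l).2).2 := by
  intro n
  induction n with
  | zero =>
    intro l hl
    have hnil : l = [] := List.eq_nil_of_length_eq_zero (Nat.le_zero.1 hl)
    subst hnil
    constructor
    · simp [pvConcealA, pvConcealB_nil]
    · simp [pvConcealA, pvSkipNonDigit, pvTakeDigits, pvConcealB_nil]
  | succ n ih =>
    intro l hl
    constructor
    · -- flag = false
      cases hp : pvPart '=' l with
      | none =>
        have hne := pvPart_none '=' l hp
        rw [pvConcealB, hp]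
        have := pvConcealA_copy l [] hne
        simpa [pvConcealA] using this
      | some p =>
        obtain ⟨hdec, hne⟩ := pvPart_some '=' l p hp
        have hlen : p.2.length ≤ n := by
          have := pvPart_len '=' l p hp
          omega
        rw [pvConcealB, hp]
        dsimp only
        rw [pvSplitRun_eq]
        rw [hdec, pvConcealA_copy p.1 ('=' :: p.2) hne]
        have hstep : pvConcealA ('=' :: p.2) false = '=' :: pvConcealA p.2 true := by
          simp [pvConcealA]
        rw [hstep, (ih p.2 hlen).2]
        simp
    · -- flag = true
      cases l with
      | nil => simp [pvConcealA, pvSkipNonDigit, pvTakeDigits, pvConcealB_nil]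
      | cons c t =>
        have hlt : t.length ≤ n := by
          simp only [List.length_cons] at hl
          omega
        by_cases hd : PySem.Chars.isdigit c = true
        · -- c is a digit: it is blanked; where the flag goes depends on the next character
          have hce : c ≠ '=' := by
            intro h; subst h; simp [PySem.Chars.isdigit] at hd
          have hA : pvConcealA (c :: t) true = ' ' :: pvConcealA t (pvNextFlag t) := by
            simp [pvConcealA, hce, hd]
          have hskip : pvSkipNonDigit (c :: t) = ([], c :: t) := by
            simp [pvSkipNonDigit, hd]
          have htake : pvTakeDigits (c :: t) =
              (c :: (pvTakeDigits t).1, (pvTakeDigits t).2) := by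
            simp [pvTakeDigits, hd]
          rw [hA, hskip]
          simp only [htake, List.length_cons, List.nil_append]
          cases t with
          | nil =>
            simp [pvConcealA, pvTakeDigits, pvConcealB_nil, List.replicate]
          | cons c2 t' =>
            by_cases hd2 : PySem.Chars.isdigit c2 = true
            · -- the run continues
              have hflag : pvNextFlag (c2 :: t') = true := by simp [pvNextFlag, hd2]
              rw [hflag, (ih (c2 :: t') hlt).2]
              have hskip2 : pvSkipNonDigit (c2 :: t') = ([], c2 :: t') := by
                simp [pvSkipNonDigit, hd2]
              rw [hskip2]
              simp [List.replicate_succ]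
            · -- the run ends here: the flag drops
              have hflag : pvNextFlag (c2 :: t') = false := by
                simp [pvNextFlag, hd2]
              rw [hflag, (ih (c2 :: t') hlt).1]
              have htake2 : pvTakeDigits (c2 :: t') = ([], c2 :: t') := by
                simp [pvTakeDigits, hd2]
              rw [htake2]
              simp [List.replicate]
        · -- c is not a digit: copied, flag stays up (also when c is another '=')
          have hA : pvConcealA (c :: t) true = c :: pvConcealA t true := by
            by_cases hce : c = '='
            · subst hce; simp [pvConcealA]
            · simp [pvConcealA, hce, hd]
          have hskip : pvSkipNonDigit (c :: t) =
              (c :: (pvSkipNonDigit t).1, (pvSkipNonDigit t).2) := by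
            simp [pvSkipNonDigit, hd]
          rw [hA, (ih t hlt).2, hskip]
          simp

theorem pvShowColor_nil : pvShowColor [] = [] := by
  unfold pvShowColor
  rfl

-- characters before the first '(' are copied verbatim by the outer loop
theorem pvShowColor_copy (h m : List Char) (hne : ∀ c ∈ h, c ≠ '(') :
    pvShowColor (h ++ m) = h ++ pvShowColor m := by
  induction h with
  | nil => rfl
  | cons c t ih =>
    have hc : c ≠ '(' := hne c (List.mem_cons_self ..)
    have hrest := ih (fun x hx => hne x (List.mem_cons_of_mem _ hx))
    rw [List.cons_append, pvShowColor]
    simp [hc, hrest]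

theorem pvShowColorB_nil : pvShowColorB [] = [] := by
  unfold pvShowColorB
  rfl

-- A's '(' state machine equals B's segment recursion
theorem pvShow_main : ∀ n : Nat, ∀ l : List Char, l.length ≤ n →
    pvShowColor l = pvShowColorB l := by
  intro n
  induction n with
  | zero =>
    intro l hl
    have hnil : l = [] := List.eq_nil_of_length_eq_zero (Nat.le_zero.1 hl)
    subst hnil
    rw [pvShowColor_nil, pvShowColorB_nil]
  | succ n ih =>
    intro l hl
    cases hp : pvPart '(' l with
    | none =>
      have hne := pvPart_none '(' l hp
      rw [pvShowColorB, hp]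
      have := pvShowColor_copy l [] hne
      simpa [pvShowColor_nil] using this
    | some p =>
      obtain ⟨hdec, hne⟩ := pvPart_some '(' l p hp
      have hlen : (pvTakeDigits (pvSkipNonDigit p.2).2).2.length ≤ n := by
        have h1 : (pvTakeDigits (pvSkipNonDigit p.2).2).2.length ≤ p.2.length :=
          le_trans (pvTakeDigits_len _) (pvSkipNonDigit_len _)
        have h2 := pvPart_len '(' l p hp
        omega
      rw [pvShowColorB, hp]
      dsimp only
      rw [pvSplitRun_eq]
      rw [hdec, pvShowColor_copy p.1 ('(' :: p.2) hne]
      rw [pvShowColor]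
      have hskip : pvSkipNonDigit ('(' :: p.2) =
          ('(' :: (pvSkipNonDigit p.2).1, (pvSkipNonDigit p.2).2) := by
        simp [pvSkipNonDigit, PySem.Chars.isdigit]
      simp only [reduceDIte, hskip]
      cases hoc : PySem.Int.ofChars? (pvTakeDigits (pvSkipNonDigit p.2).2).1 with
      | none =>
        simp [ih _ hlen]
      | some nid =>
        dsimp only
        by_cases hm : PySem.Int.mod nid 10 < 2
        · simp only [hm, if_true, ih _ hlen]
          simp
        · simp only [hm, if_false, ih _ hlen]
          simp

-- ===== VERDICT (by name: the statement is the Claim_ definition above) =====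
theorem concealAnswer_spec : Claim_equal_concealAnswer := by
  intro content is_use_color _ _
  unfold Spec_concealAnswer concealAnswer concealAnswer_alt
  simp only [(pvConceal_main content.toList.length content.toList le_rfl).1,
      pvShow_main (pvConcealB content.toList).length (pvConcealB content.toList) le_rfl]
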